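-- pv_equiv track=rewrite | github.com/pypi-data/pypi-mirror-367 | packages/skeletone/skeletone-0.1.14-py3-none-any.whl/skeletone/upgrade.py | filter_patch_content
-- ===== SOURCE A (Python) =====
-- def filter_patch_content(patch_content):
--     """Remove make_diff.sh and other unnecessary files from patch"""
--     lines = patch_content.split('\n')
--     filtered_lines = []
--     skip_section = False
--
--     for i, line in enumerate(lines):
--         # Check if this is a new file section
--         if line.startswith('diff --git'):
--             # Check if this section is for make_diff.sh
--             if 'make_diff.sh' in line:
--                 skip_section = True
--                 # Find the next diff section or end of file
--                 for j in range(i + 1, len(lines)):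
--                     if lines[j].startswith('diff --git') or j == len(lines) - 1:
--                         break
--                 continue
--             else:
--                 skip_section = False
--
--         if not skip_section:
--             filtered_lines.append(line)
--
--     return '\n'.join(filtered_lines)
-- ===== SOURCE B (Python) =====
-- def filter_patch_content(patch_content):
--     """Remove make_diff.sh and other unnecessary files from patch"""
--     lines = patch_content.split('\n')
--     # Partition into a leading group plus one group per 'diff --git' header line.
--     groups = []
--     current = []
--     for line in lines:
--         if line.startswith('diff --git'):
--             groups.append(current)
--             current = [line]
--         else:
--             current.append(line)
--     groups.append(current)
--     # Keep every group whose header is not a make_diff.sh section.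
--     kept = []
--     for g in groups:
--         if g and g[0].startswith('diff --git') and 'make_diff.sh' in g[0]:
--             continue
--         kept.extend(g)
--     return '\n'.join(kept)
-- ===== Notes on version B (the rewrite author's own statement) =====
-- stated objective: simpler
-- what changed: B partitions the lines once into sections at the git diff header lines and concatenates the sections whose header does not mention make_diff.sh, instead of A's per-line skip flag; A's dead inner lookahead loop is omitted.
import Mathlib
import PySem

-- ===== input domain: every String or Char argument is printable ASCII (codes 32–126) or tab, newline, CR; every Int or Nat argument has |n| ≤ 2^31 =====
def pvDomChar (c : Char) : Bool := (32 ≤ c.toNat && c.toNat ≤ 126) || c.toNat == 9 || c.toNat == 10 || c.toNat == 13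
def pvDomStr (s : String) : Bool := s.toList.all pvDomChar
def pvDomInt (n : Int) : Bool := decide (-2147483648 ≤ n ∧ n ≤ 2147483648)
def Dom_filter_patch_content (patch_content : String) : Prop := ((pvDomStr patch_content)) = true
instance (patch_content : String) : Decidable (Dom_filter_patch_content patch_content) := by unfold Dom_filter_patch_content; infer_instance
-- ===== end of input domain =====

-- B partitions the lines into 'diff --git' sections and keeps whole sections,
-- instead of A's per-line skip flag (objective: simpler; A's inner lookahead loop is dead and omitted).

-- ===== PORT A =====
-- loop body of A: state = (filtered_lines, skip_section), p = (i, line).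
-- (A's inner 'for j in range(i+1, len(lines))' loop only breaks and binds nothing used: it has no effect, so it is a no-op here.)
def pvStepA (st : List String × Bool) (p : Int × String) : List String × Bool :=
  let line := p.2
  if PySem.Str.startswith line "diff --git" then
    if PySem.Str.isIn "make_diff.sh" line then
      (st.1, true)            -- skip_section = True; dead lookahead loop; continue
    else
      (st.1 ++ [line], false) -- skip_section = False, then 'if not skip_section: append(line)'
  else
    if st.2 then st else (st.1 ++ [line], st.2)

def filter_patch_content (patch_content : String) : String :=
  let lines := (PySem.Str.split? patch_content "\n").getD []   -- sep "\n" ≠ "": split? is some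
  let st := (PySem.List.enumerate lines).foldl pvStepA ([], false)
  PySem.Str.join "\n" st.1

-- ===== PORT B =====
-- grouping step of B: state = (finished groups, current group)
def pvStepG (st : List (List String) × List String) (line : String) : List (List String) × List String :=
  if PySem.Str.startswith line "diff --git" then (st.1 ++ [st.2], [line])
  else (st.1, st.2 ++ [line])

-- keeping step of B: 'if g and g[0].startswith(...) and ... in g[0]: continue; kept.extend(g)'
def pvStepK (acc : List String) (g : List String) : List String :=
  match g with
  | [] => acc
  | h :: _ =>
    if PySem.Str.startswith h "diff --git" && PySem.Str.isIn "make_diff.sh" h then acc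
    else acc ++ g

def filter_patch_content_alt (patch_content : String) : String :=
  let lines := (PySem.Str.split? patch_content "\n").getD []
  let st := lines.foldl pvStepG ([], [])
  let groups := st.1 ++ [st.2]
  let kept := groups.foldl pvStepK []
  PySem.Str.join "\n" kept

-- ===== PRECONDITION & SPEC =====
def Spec_filter_patch_content (patch_content : String) (out : String) : Prop := out = filter_patch_content_alt patch_content
instance (patch_content : String) (out : String) : Decidable (Spec_filter_patch_content patch_content out) := by unfold Spec_filter_patch_content; infer_instance

-- ===== CLAIM (what is proved, stated in full; the proofs are below) =====
def Claim_equal_filter_patch_content : Prop := ∀ (patch_content : String), Dom_filter_patch_content patch_content → Spec_filter_patch_content patch_content (filter_patch_content patch_content)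

-- ===== LEMMAS AND PROOFS =====

-- common recursive characterisation of the list of kept lines
def pvKeep : List String → Bool → List String
  | [], _ => []
  | l :: ls, skip =>
    if PySem.Str.startswith l "diff --git" then
      if PySem.Str.isIn "make_diff.sh" l then pvKeep ls true
      else l :: pvKeep ls false
    else if skip then pvKeep ls skip else l :: pvKeep ls skip

-- whether the section whose lines so far are `cur` is being dropped
def pvDropFlag (cur : List String) : Bool :=
  match cur with
  | [] => false
  | h :: _ => PySem.Str.startswith h "diff --git" && PySem.Str.isIn "make_diff.sh" h

-- contribution of a finished group
def pvContrib (cur : List String) : List String := if pvDropFlag cur then [] else cur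

-- flattened kept lines of a group list
def pvKf (gs : List (List String)) : List String := gs.flatMap (fun g => pvStepK [] g)

theorem pvStepK_eq (acc g : List String) : pvStepK acc g = acc ++ pvStepK [] g := by
  cases g with
  | nil => simp [pvStepK]
  | cons h t => simp only [pvStepK]; split <;> simp

theorem pvContrib_eq (g : List String) : pvStepK [] g = pvContrib g := by
  cases g with
  | nil => simp [pvStepK, pvContrib, pvDropFlag]
  | cons h t => simp only [pvStepK, pvContrib, pvDropFlag]; split <;> simp_all

theorem pvKf_foldl (gs : List (List String)) (acc : List String) :
    gs.foldl pvStepK acc = acc ++ pvKf gs := by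
  induction gs generalizing acc with
  | nil => simp [pvKf]
  | cons g gs ih => simp [List.foldl_cons, pvStepK_eq acc g, pvKf, ih]

theorem lemA (ls : List String) (s : Int) (acc : List String) (skip : Bool) :
    ((PySem.List.enumerate ls s).foldl pvStepA (acc, skip)).1 = acc ++ pvKeep ls skip := by
  induction ls generalizing s acc skip with
  | nil => simp [PySem.List.enumerate_nil, pvKeep]
  | cons l ls ih =>
    rw [PySem.List.enumerate_cons, List.foldl_cons]
    simp only [pvStepA, pvKeep]
    split
    · split
      · simp [ih]
      · simp [ih]
    · cases skip <;> simp [ih]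

theorem pvKf_append (a b : List (List String)) : pvKf (a ++ b) = pvKf a ++ pvKf b := by
  simp only [pvKf, List.flatMap_append]

theorem pvKf_singleton (g : List String) : pvKf [g] = pvContrib g := by
  simp only [pvKf, List.flatMap_cons, List.flatMap_nil, List.append_nil, pvContrib_eq]

theorem lemG (ls : List String) (gs : List (List String)) (cur : List String) :
    pvKf ((ls.foldl pvStepG (gs, cur)).1 ++ [(ls.foldl pvStepG (gs, cur)).2]) =
      pvKf gs ++ pvContrib cur ++ pvKeep ls (pvDropFlag cur) := by
  induction ls generalizing gs cur with
  | nil => simp only [List.foldl_nil, pvKeep, pvKf_append, pvKf_singleton, List.append_nil]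
  | cons l ls ih =>
    rw [List.foldl_cons]
    cases hs : PySem.Str.startswith l "diff --git" with
    | true =>
      have hstep : pvStepG (gs, cur) l = (gs ++ [cur], [l]) := by
        simp only [pvStepG]; rw [hs]; rfl
      rw [hstep, ih, pvKf_append, pvKf_singleton]
      cases hc : PySem.Str.isIn "make_diff.sh" l with
      | true =>
        have hf : pvDropFlag [l] = true := by simp only [pvDropFlag]; rw [hs, hc]; rfl
        have hk : pvKeep (l :: ls) (pvDropFlag cur) = pvKeep ls true := by
          simp only [pvKeep]; rw [hs, hc]; rfl
        rw [hk]; simp [pvContrib, hf]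
      | false =>
        have hf : pvDropFlag [l] = false := by simp only [pvDropFlag]; rw [hs, hc]; rfl
        have hk : pvKeep (l :: ls) (pvDropFlag cur) = l :: pvKeep ls false := by
          simp only [pvKeep]; rw [hs, hc]; rfl
        rw [hk]; simp [pvContrib, hf]
    | false =>
      have hstep : pvStepG (gs, cur) l = (gs, cur ++ [l]) := by
        simp only [pvStepG]; rw [hs]; rfl
      rw [hstep, ih]
      cases cur with
      | nil =>
        have hf : pvDropFlag ([] ++ [l]) = false := by
          simp only [List.nil_append, pvDropFlag]; rw [hs]; rfl
        have hk : pvKeep (l :: ls) (pvDropFlag ([] : List String)) = l :: pvKeep ls false := by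
          simp only [pvKeep, pvDropFlag]; rw [hs]; rfl
        have hcont : pvContrib ([] ++ [l]) = [l] := by
          simp only [pvContrib]; rw [hf]; rfl
        have hc0 : pvContrib ([] : List String) = [] := rfl
        rw [hf, hcont, hk, hc0]; simp
      | cons h t =>
        have hflag : pvDropFlag ((h :: t) ++ [l]) = pvDropFlag (h :: t) := rfl
        cases hd : pvDropFlag (h :: t) with
        | true =>
          have hk : pvKeep (l :: ls) true = pvKeep ls true := by
            simp only [pvKeep]; rw [hs]; rfl
          have hc1 : pvContrib ((h :: t) ++ [l]) = [] := by
            simp only [pvContrib]; rw [hflag, hd]; rfl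
          have hc2 : pvContrib (h :: t) = [] := by
            simp only [pvContrib]; rw [hd]; rfl
          rw [hk, hc1, hc2, hflag, hd]
        | false =>
          have hk : pvKeep (l :: ls) false = l :: pvKeep ls false := by
            simp only [pvKeep]; rw [hs]; rfl
          have hc1 : pvContrib ((h :: t) ++ [l]) = (h :: t) ++ [l] := by
            simp only [pvContrib]; rw [hflag, hd]; rfl
          have hc2 : pvContrib (h :: t) = h :: t := by
            simp only [pvContrib]; rw [hd]; rfl
          rw [hk, hc1, hc2, hflag, hd]; simp

theorem pvMain (lines : List String) :
    ((PySem.List.enumerate lines).foldl pvStepA ([], false)).1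
      = ((lines.foldl pvStepG (([] : List (List String)), ([] : List String))).1
          ++ [(lines.foldl pvStepG (([] : List (List String)), ([] : List String))).2]).foldl pvStepK [] := by
  rw [lemA lines 0 [] false, pvKf_foldl, lemG lines [] []]
  simp [pvKf, pvContrib, pvDropFlag]

-- ===== VERDICT (by name: the statement is the Claim_ definition above) =====
theorem filter_patch_content_spec : Claim_equal_filter_patch_content := by
  intro patch_content _
  exact congrArg (PySem.Str.join "\n") (pvMain ((PySem.Str.split? patch_content "\n").getD []))
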